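-- pv_equiv track=rewrite | github.com/bfishbaum/euler | prob107.py | maxRedunConnect
-- ===== SOURCE A (Python) =====
-- import copy
--
-- def connectedNetwork(network):
-- 	connected = [a == 0 for a in range(len(network))]
-- 	visited = set()
-- 	# every time a node is reached
-- 	# go to every unvisited node
-- 	# set node to True when visited
-- 	def recurse(index):
-- 		if(index not in visited):
-- 			visited.add(index)
-- 			connected[index] = True
-- 			node = network[index]
-- 			for x in range(len(node)):
-- 				if(x not in visited):
-- 					if node[x]:
-- 						recurse(x)
--
-- 	# start at first node
-- 	recurse(1)
-- 	# make sure all nodes have been visited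
-- 	return False not in connected
--
-- def isRemovable(x,y,network):
-- 	temp = copy.deepcopy(network)
-- 	removeConnection(x,y,temp)
-- 	return connectedNetwork(temp)
--
-- def maxRedunConnect(network):
-- 	max1 = 0
-- 	maxP = None
-- 	for x in range(len(network)):
-- 		for y in range(x+1,len(network[x])):
-- 			if(network[x][y] > max1):
-- 				if(isRemovable(x,y,network)):
-- 					maxP = (x,y)
-- 	return maxP
--
-- def removeConnection(row,col,network):
-- 	network[row][col] = 0
-- 	network[col][row] = 0
-- ===== SOURCE B (Python) =====
-- def maxRedunConnect(network):
-- 	n = len(network)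
-- 	for x in range(n - 1, -1, -1):
-- 		for y in range(len(network[x]) - 1, x, -1):
-- 			if network[x][y] > 0 and _connectedWithout(x, y, network):
-- 				return (x, y)
-- 	return None
--
-- def _connectedWithout(rx, ry, network):
-- 	# reachability from node 1, skipping the edge {rx, ry}; no matrix copy
-- 	reach = {1}
-- 	stack = [1]
-- 	while stack:
-- 		i = stack.pop()
-- 		row = network[i]
-- 		for j in range(len(row)):
-- 			if j not in reach and row[j] and not ((i == rx and j == ry) or (i == ry and j == rx)):
-- 				reach.add(j)
-- 				stack.append(j)
-- 	return all(k in reach for k in range(1, len(network)))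
-- ===== Notes on version B (the rewrite author's own statement) =====
-- stated objective: alternative
-- what changed: B drops A's per-edge deepcopy+mutation+recursive DFS: it tests connectivity with an iterative worklist reachability that simply skips the candidate edge (no matrix copy), and scans the edge pairs back-to-front returning the first removable one (= A's last kept pair) with early exit, instead of folding over all pairs.
-- outside the precondition, e.g. on maxRedunConnect([[0, 1, 0], [1, 0]]): A returns (0, 1), B returns (0, 1); on maxRedunConnect([[0, 0, 5], [0, 0]]): A raises IndexError, B returns (0, 2)
import Mathlib
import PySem

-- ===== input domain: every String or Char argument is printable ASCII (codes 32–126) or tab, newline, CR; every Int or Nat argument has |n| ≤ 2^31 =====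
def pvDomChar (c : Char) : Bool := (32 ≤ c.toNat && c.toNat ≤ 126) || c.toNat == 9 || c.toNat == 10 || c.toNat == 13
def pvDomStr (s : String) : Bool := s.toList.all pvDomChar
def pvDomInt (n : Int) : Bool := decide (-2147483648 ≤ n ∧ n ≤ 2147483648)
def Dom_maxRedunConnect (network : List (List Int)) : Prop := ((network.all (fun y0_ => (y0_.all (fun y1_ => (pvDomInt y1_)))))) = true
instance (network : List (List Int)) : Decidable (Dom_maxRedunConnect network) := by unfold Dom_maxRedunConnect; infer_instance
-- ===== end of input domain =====

-- B replaces A's per-edge deepcopy + recursive DFS with an in-place skip-edge worklist reachability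
-- test and scans the edges back-to-front with early exit (A keeps the LAST removable edge; B returns
-- the FIRST from the back — same value). Python A mutates only its deepcopy, so no observable
-- side effect differs; equivalence is about the return value.

-- ===== PORT A =====
-- network[row][col] = 0 ; network[col][row] = 0  (Python mutates the copy; returned here).
-- pySetD/pyGetD are exact for the in-range non-negative indices that are the only ones reached under Pre_.
def pvRemoveConnection (row col : Int) (network : List (List Int)) : List (List Int) :=
  let net1 := PySem.List.pySetD network row (PySem.List.pySetD (PySem.List.pyGetD network row []) col 0)
  PySem.List.pySetD net1 col (PySem.List.pySetD (PySem.List.pyGetD net1 col []) row 0)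

-- `recurse` of connectedNetwork, with its for-loop as a mutually recursive list walk.
-- Python's recursion carries no fuel; the fuel (net.length + 1 at the top call) is proved
-- sufficient below: every non-trivial call strictly grows `visited ⊆ [0, n)`.
mutual
def pvRecurseList (net : List (List Int)) : Nat → List Int → List Int → PySem.Set Int × List Bool → PySem.Set Int × List Bool
  | _, _, [], st => st
  | f, node, x :: xs, st =>
    pvRecurseList net f node xs
      (if !(PySem.Set.contains st.1 x) then
        (if PySem.List.pyGetD node x 0 ≠ 0 then pvRecurse net f x st else st)
       else st)
  termination_by f _ xs _ => (f, xs.length + 1)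
def pvRecurse (net : List (List Int)) : Nat → Int → PySem.Set Int × List Bool → PySem.Set Int × List Bool
  | 0, _, st => st
  | f+1, index, st =>
    if PySem.Set.contains st.1 index then st
    else
      let visited := PySem.Set.add st.1 index
      let connected := PySem.List.pySetD st.2 index true
      let node := PySem.List.pyGetD net index []
      pvRecurseList net f node (PySem.List.pyRange 0 (PySem.List.len node) 1) (visited, connected)
  termination_by f _ _ => (f, 0)
end

def pvConnectedNetwork (network : List (List Int)) : Bool :=
  let connected := (PySem.List.pyRange 0 (PySem.List.len network) 1).map (fun a => a == 0)
  let st := pvRecurse network (network.length + 1) 1 (PySem.Set.empty, connected)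
  !(st.2.contains false)

-- deepcopy; removeConnection on the copy; connectivity check
def pvIsRemovable (x y : Int) (network : List (List Int)) : Bool :=
  pvConnectedNetwork (pvRemoveConnection x y network)

def maxRedunConnect (network : List (List Int)) : Option (Int × Int) :=
  let st := (PySem.List.pyRange 0 (PySem.List.len network) 1).foldl
    (fun (acc : Int × Option (Int × Int)) x =>
      (PySem.List.pyRange (x + 1) (PySem.List.len (PySem.List.pyGetD network x [])) 1).foldl
        (fun (acc : Int × Option (Int × Int)) y =>
          if PySem.List.pyGetD (PySem.List.pyGetD network x []) y 0 > acc.1 then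
            (if pvIsRemovable x y network then (acc.1, some (x, y)) else acc)
          else acc) acc) ((0 : Int), (none : Option (Int × Int)))
  st.2

-- ===== PORT B =====
-- worklist reachability from node 1, skipping the edge {rx, ry}; Python's end-of-list stack is
-- represented head-first (push = cons, pop = head): the same LIFO discipline, element for element.
-- The while-loop fuel (net.length + 1) is proved sufficient below: each iteration pops once and
-- every push strictly grows `reach ⊆ [0, n)`.
def pvReachLoop (rx ry : Int) (net : List (List Int)) : Nat → PySem.Set Int → List Int → PySem.Set Int
  | 0, reach, _ => reach
  | _, reach, [] => reach
  | f+1, reach, i :: stack =>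
    let row := PySem.List.pyGetD net i []
    let s := (PySem.List.pyRange 0 (PySem.List.len row) 1).foldl
      (fun (s : PySem.Set Int × List Int) j =>
        if !(PySem.Set.contains s.1 j) && (PySem.List.pyGetD row j 0 != 0) &&
           !((i == rx && j == ry) || (i == ry && j == rx)) then
          (PySem.Set.add s.1 j, j :: s.2)
        else s) (reach, stack)
    pvReachLoop rx ry net f s.1 s.2

def pvConnectedWithout (rx ry : Int) (network : List (List Int)) : Bool :=
  let reach := pvReachLoop rx ry network (network.length + 1) (PySem.Set.add PySem.Set.empty 1) [1]
  (PySem.List.pyRange 1 (PySem.List.len network) 1).all (fun k => PySem.Set.contains reach k)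

def pvFindRow (network : List (List Int)) : List Int → Option (Int × Int)
  | [] => none
  | x :: xs =>
    match (PySem.List.pyRange (PySem.List.len (PySem.List.pyGetD network x []) - 1) x (-1)).find?
        (fun y => decide (PySem.List.pyGetD (PySem.List.pyGetD network x []) y 0 > 0) &&
                  pvConnectedWithout x y network) with
    | some y => some (x, y)
    | none => pvFindRow network xs

def maxRedunConnect_alt (network : List (List Int)) : Option (Int × Int) :=
  pvFindRow network (PySem.List.pyRange (PySem.List.len network - 1) (-1) (-1))

-- ===== PRECONDITION & SPEC =====
-- Pre_ excludes the ragged matrices on which A raises IndexError (a positive upper entry whose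
-- mirror cell network[y][x] does not exist, or the DFS walking a row longer than the matrix into
-- an out-of-range node); it admits every matrix with no positive upper entry (no edge is ever
-- tested) and every matrix whose rows are no longer than the matrix and whose positive upper
-- entries all have an in-range mirror cell.  A few ragged inputs A returns on (over-long rows the
-- DFS never leaves range on) are also excluded; see the cites.
def Pre_maxRedunConnect (network : List (List Int)) : Prop :=
  (∀ x ∈ PySem.List.pyRange 0 (PySem.List.len network) 1,
    ∀ y ∈ PySem.List.pyRange (x + 1) (PySem.List.len (PySem.List.pyGetD network x [])) 1,
      PySem.List.pyGetD (PySem.List.pyGetD network x []) y 0 ≤ 0)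
  ∨ ((∀ row ∈ network, row.length ≤ network.length) ∧
     (∀ x ∈ PySem.List.pyRange 0 (PySem.List.len network) 1,
       ∀ y ∈ PySem.List.pyRange (x + 1) (PySem.List.len (PySem.List.pyGetD network x [])) 1,
         0 < PySem.List.pyGetD (PySem.List.pyGetD network x []) y 0 →
           x < ((PySem.List.pyGetD network y []).length : Int)))
instance (network : List (List Int)) : Decidable (Pre_maxRedunConnect network) := by
  unfold Pre_maxRedunConnect; infer_instance

def pvWitness_maxRedunConnect : List (List Int) := [[0, 1], [1, 0]]

def Spec_maxRedunConnect (network : List (List Int)) (out : Option (Int × Int)) : Prop := out = maxRedunConnect_alt network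
instance (network : List (List Int)) (out : Option (Int × Int)) : Decidable (Spec_maxRedunConnect network out) := by unfold Spec_maxRedunConnect; infer_instance

-- ===== CLAIM (what is proved, stated in full; the proofs are below) =====
def Claim_equal_maxRedunConnect : Prop := ∀ (network : List (List Int)), Dom_maxRedunConnect network → Pre_maxRedunConnect network → Spec_maxRedunConnect network (maxRedunConnect network)

-- ===== LEMMAS AND PROOFS =====

-- ----- shared notions -----
def pvEdge (m : List (List Int)) (i j : Int) : Prop :=
  0 ≤ i ∧ 0 ≤ j ∧ j < ((PySem.List.pyGetD m i []).length : Int) ∧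
    PySem.List.pyGetD (PySem.List.pyGetD m i []) j 0 ≠ 0

def pvSkip (rx ry i j : Int) : Prop := (i = rx ∧ j = ry) ∨ (i = ry ∧ j = rx)

def pvEdgeS (rx ry : Int) (m : List (List Int)) (i j : Int) : Prop :=
  pvEdge m i j ∧ ¬ pvSkip rx ry i j

lemma pvRow_le {net : List (List Int)} (hle : ∀ row ∈ net, row.length ≤ net.length)
    {i : Int} (h0 : 0 ≤ i) :
    (PySem.List.pyGetD net i []).length ≤ net.length := by
  by_cases h1 : i < (net.length : Int)
  · exact hle _ (PySem.List.pyGetD_mem net [] ⟨by omega, h1⟩)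
  · rw [PySem.List.pyGetD_of_none net i []
      ((PySem.List.pyGet?_eq_none_iff net i).mpr (fun hr => h1 hr.2))]
    simp

lemma pvCard_le {V : List Int} {n : Nat} (hnd : V.Nodup) (hb : ∀ a ∈ V, 0 ≤ a ∧ a < (n : Int)) :
    V.length ≤ n := by
  have hsub : V ⊆ PySem.List.pyRange 0 (n : Int) 1 := by
    intro a ha
    rw [PySem.List.mem_pyRange_one]
    exact ⟨(hb a ha).1, (hb a ha).2⟩
  have h := (List.subperm_of_subset hnd hsub).length_le
  rw [PySem.List.length_pyRange_one] at h
  omega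

-- pyGetD over List.set at a nonnegative index
lemma pvGetD_set {α : Type} (xs : List α) (k : Nat) (v d : α) (i : Int) (hi : 0 ≤ i)
    (hk : k < xs.length) :
    PySem.List.pyGetD (xs.set k v) i d = if i = (k : Int) then v else PySem.List.pyGetD xs i d := by
  have hcast : i = ((i.toNat : Nat) : Int) := (Int.toNat_of_nonneg hi).symm
  rw [hcast, ← PySem.List.pySetD_natCast xs k v, PySem.List.pyGetD_pySetD_natCast xs k i.toNat v d hk]
  by_cases h : i.toNat = k
  · simp [h]
  · simp [h]
    omega

def pvMask (n : Nat) (V : PySem.Set Int) : List Bool :=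
  (PySem.List.pyRange 0 (n : Int) 1).map (fun a => a == 0 || PySem.Set.contains V a)

lemma pvMask_empty (n : Nat) :
    (PySem.List.pyRange 0 (n : Int) 1).map (fun a => a == 0) = pvMask n PySem.Set.empty := by
  unfold pvMask
  apply List.map_congr_left
  intro a _
  simp [PySem.Set.empty]

lemma pvMask_set {n : Nat} (V : PySem.Set Int) {i : Int} (h0 : 0 ≤ i) (h1 : i < (n : Int)) :
    PySem.List.pySetD (pvMask n V) i true = pvMask n (PySem.Set.add V i) := by
  rw [PySem.List.pySetD_of_nonneg _ _ h0]
  have hlen : (pvMask n V).length = n := by simp [pvMask, PySem.List.length_pyRange_one]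
  apply List.ext_getElem
  · simp [pvMask, PySem.List.length_pyRange_one]
  · intro k hk1 hk2
    have hkn : k < n := by simpa [pvMask, PySem.List.length_pyRange_one] using hk2
    have hrlen : k < (PySem.List.pyRange 0 (n : Int) 1).length := by
      rw [PySem.List.length_pyRange_one]; omega
    rw [List.getElem_set]
    simp only [pvMask, List.getElem_map, PySem.List.getElem_pyRange_one]
    by_cases hki : i.toNat = k
    · rw [if_pos hki]
      have hik : (0 : Int) + (k : Int) = i := by omega
      rw [hik]
      apply Bool.coe_iff_coe.mp
      simp [PySem.Set.mem_add]
    · rw [if_neg hki]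
      have hne : (k : Int) ≠ i := by omega
      apply Bool.coe_iff_coe.mp
      simp [PySem.Set.mem_add]
      constructor
      · tauto
      · rintro (h | h | h) <;> tauto

lemma pvMask_contains_false {n : Nat} (V : PySem.Set Int) :
    ((pvMask n V).contains false = false) ↔ (∀ a : Int, 0 ≤ a → a < (n : Int) → a = 0 ∨ a ∈ V) := by
  rw [← Bool.not_eq_true, List.contains_iff_mem]
  simp only [pvMask, List.mem_map, PySem.List.mem_pyRange_one]
  constructor
  · intro h a ha0 han
    by_contra hc
    push_neg at hc
    exact h ⟨a, ⟨ha0, han⟩, by simp [hc.1, hc.2]⟩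
  · rintro h ⟨a, ⟨ha0, han⟩, hfa⟩
    rcases h a ha0 han with h0 | hm
    · simp [h0] at hfa
    · simp [hm] at hfa


def pvGoodA (net : List (List Int)) (st : PySem.Set Int × List Bool) : Prop :=
  (∀ a ∈ st.1, 0 ≤ a ∧ a < (net.length : Int)) ∧ st.1.Nodup ∧ st.2 = pvMask net.length st.1

def pvAConcl (net : List (List Int)) (f : Nat) (i : Int) (st : PySem.Set Int × List Bool) : Prop :=
  pvGoodA net (pvRecurse net f i st) ∧
  (∀ a ∈ st.1, a ∈ (pvRecurse net f i st).1) ∧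
  i ∈ (pvRecurse net f i st).1 ∧
  (∀ a ∈ (pvRecurse net f i st).1, a ∈ st.1 ∨ Relation.ReflTransGen (pvEdge net) i a) ∧
  (∀ a ∈ (pvRecurse net f i st).1, a ∉ st.1 → ∀ j, pvEdge net a j → j ∈ (pvRecurse net f i st).1)

def pvLConcl (net : List (List Int)) (f : Nat) (i : Int) (xs : List Int)
    (st : PySem.Set Int × List Bool) : Prop :=
  pvGoodA net (pvRecurseList net f (PySem.List.pyGetD net i []) xs st) ∧
  (∀ a ∈ st.1, a ∈ (pvRecurseList net f (PySem.List.pyGetD net i []) xs st).1) ∧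
  (∀ a ∈ (pvRecurseList net f (PySem.List.pyGetD net i []) xs st).1,
    a ∈ st.1 ∨ Relation.ReflTransGen (pvEdge net) i a) ∧
  (∀ a ∈ (pvRecurseList net f (PySem.List.pyGetD net i []) xs st).1, a ∉ st.1 →
    ∀ j, pvEdge net a j → j ∈ (pvRecurseList net f (PySem.List.pyGetD net i []) xs st).1) ∧
  (∀ x ∈ xs, PySem.List.pyGetD (PySem.List.pyGetD net i []) x 0 ≠ 0 →
    x ∈ (pvRecurseList net f (PySem.List.pyGetD net i []) xs st).1)

lemma pvRecurseList_spec (net : List (List Int)) (hle : ∀ row ∈ net, row.length ≤ net.length)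
    (f : Nat)
    (IH : ∀ (i : Int) (st : PySem.Set Int × List Bool), pvGoodA net st → 0 ≤ i →
      i < (net.length : Int) → net.length + 1 ≤ f + st.1.length → pvAConcl net f i st)
    (i : Int) (h0 : 0 ≤ i) (h1 : i < (net.length : Int)) :
    ∀ (xs : List Int) (st : PySem.Set Int × List Bool), pvGoodA net st →
      (∀ x ∈ xs, 0 ≤ x ∧ x < ((PySem.List.pyGetD net i []).length : Int)) →
      net.length + 1 ≤ f + st.1.length →
      pvLConcl net f i xs st := by
  intro xs
  induction xs with
  | nil =>
    intro st hg hxs hfuel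
    unfold pvLConcl
    rw [pvRecurseList]
    exact ⟨hg, fun a ha => ha, fun a ha => Or.inl ha,
      fun a ha hna => absurd ha hna, fun x hx => absurd hx (List.not_mem_nil)⟩
  | cons x xs ihx =>
    intro st hg hxs hfuel
    have hx0 : 0 ≤ x := (hxs x (by simp)).1
    have hxlt : x < ((PySem.List.pyGetD net i []).length : Int) := (hxs x (by simp)).2
    have hxn : x < (net.length : Int) := by
      have hr := pvRow_le hle h0
      omega
    by_cases hx : x ∈ st.1
    · -- x already visited: state unchanged
      have hcx : PySem.Set.contains st.1 x = true := (PySem.Set.contains_iff _ _).mpr hx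
      have hstep : pvRecurseList net f (PySem.List.pyGetD net i []) (x :: xs) st
          = pvRecurseList net f (PySem.List.pyGetD net i []) xs st := by
        rw [pvRecurseList]; simp [hx]
      have hrest := ihx st hg (fun z hz => hxs z (by simp [hz])) hfuel
      unfold pvLConcl at hrest ⊢
      rw [hstep]
      refine ⟨hrest.1, hrest.2.1, hrest.2.2.1, hrest.2.2.2.1, ?_⟩
      intro z hz hnz
      rcases List.mem_cons.mp hz with rfl | hz'
      · exact hrest.2.1 z hx
      · exact hrest.2.2.2.2 z hz' hnz
    · have hcx : PySem.Set.contains st.1 x = false := by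
        rw [← Bool.not_eq_true, PySem.Set.contains_iff]; exact hx
      by_cases hnz : PySem.List.pyGetD (PySem.List.pyGetD net i []) x 0 ≠ 0
      · -- recurse into x
        have hstep : pvRecurseList net f (PySem.List.pyGetD net i []) (x :: xs) st
            = pvRecurseList net f (PySem.List.pyGetD net i []) xs (pvRecurse net f x st) := by
          rw [pvRecurseList]; simp [hx, hnz]
        have hA := IH x st hg hx0 hxn hfuel
        obtain ⟨hg1, hsub1, hxin1, hsound1, hclosed1⟩ := hA
        have hlen1 : st.1.length ≤ (pvRecurse net f x st).1.length :=
          (List.subperm_of_subset hg.2.1 hsub1).length_le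
        have hrest := ihx (pvRecurse net f x st) hg1
          (fun z hz => hxs z (by simp [hz])) (by omega)
        obtain ⟨hgR, hsubR, hsoundR, hclosedR, heR⟩ := hrest
        have hedge : pvEdge net i x := ⟨h0, hx0, hxlt, hnz⟩
        unfold pvLConcl
        rw [hstep]
        refine ⟨hgR, ?_, ?_, ?_, ?_⟩
        · intro a ha; exact hsubR a (hsub1 a ha)
        · intro a ha
          rcases hsoundR a ha with h1 | h1
          · rcases hsound1 a h1 with h2 | h2
            · exact Or.inl h2
            · exact Or.inr (Relation.ReflTransGen.head hedge h2)
          · exact Or.inr h1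
        · intro a ha hna j hej
          by_cases ha1 : a ∈ (pvRecurse net f x st).1
          · exact hsubR j (hclosed1 a ha1 hna j hej)
          · exact hclosedR a ha ha1 j hej
        · intro z hz hnzz
          rcases List.mem_cons.mp hz with rfl | hz'
          · exact hsubR z hxin1
          · exact heR z hz' hnzz
      · -- zero entry: state unchanged
        have hz0 : PySem.List.pyGetD (PySem.List.pyGetD net i []) x 0 = 0 := not_not.mp hnz
        have hstep : pvRecurseList net f (PySem.List.pyGetD net i []) (x :: xs) st
            = pvRecurseList net f (PySem.List.pyGetD net i []) xs st := by
          rw [pvRecurseList]; simp [hx, hz0]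
        have hrest := ihx st hg (fun z hz => hxs z (by simp [hz])) hfuel
        unfold pvLConcl at hrest ⊢
        rw [hstep]
        refine ⟨hrest.1, hrest.2.1, hrest.2.2.1, hrest.2.2.2.1, ?_⟩
        intro z hz hnzz
        rcases List.mem_cons.mp hz with rfl | hz'
        · exact absurd hnzz hnz
        · exact hrest.2.2.2.2 z hz' hnzz

lemma pvRecurse_spec (net : List (List Int)) (hle : ∀ row ∈ net, row.length ≤ net.length) :
    ∀ (f : Nat) (i : Int) (st : PySem.Set Int × List Bool), pvGoodA net st → 0 ≤ i →
      i < (net.length : Int) → net.length + 1 ≤ f + st.1.length → pvAConcl net f i st := by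
  intro f
  induction f with
  | zero =>
    intro i st hg h0 h1 hfuel
    exact absurd hfuel (by have := pvCard_le hg.2.1 hg.1; omega)
  | succ f IHf =>
    intro i st hg h0 h1 hfuel
    by_cases hi : i ∈ st.1
    · have hstep : pvRecurse net (f + 1) i st = st := by rw [pvRecurse]; simp [hi]
      unfold pvAConcl
      rw [hstep]
      exact ⟨hg, fun a ha => ha, hi, fun a ha => Or.inl ha, fun a ha hna => absurd ha hna⟩
    · have hstep : pvRecurse net (f + 1) i st
          = pvRecurseList net f (PySem.List.pyGetD net i [])
              (PySem.List.pyRange 0 (PySem.List.len (PySem.List.pyGetD net i [])) 1)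
              (PySem.Set.add st.1 i, PySem.List.pySetD st.2 i true) := by
        rw [pvRecurse]; simp [hi]
      have hg' : pvGoodA net (PySem.Set.add st.1 i, PySem.List.pySetD st.2 i true) := by
        refine ⟨?_, PySem.Set.nodup_add _ _ hg.2.1, ?_⟩
        · intro a ha
          rcases (PySem.Set.mem_add _ _ _).mp ha with h | rfl
          · exact hg.1 a h
          · exact ⟨h0, h1⟩
        · show PySem.List.pySetD st.2 i true = _
          rw [hg.2.2, pvMask_set st.1 h0 h1]
      have hlen' : (PySem.Set.add st.1 i).length = st.1.length + 1 := by
        simp [PySem.Set.add_of_not_mem hi]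
      have hL := pvRecurseList_spec net hle f IHf i h0 h1
        (PySem.List.pyRange 0 (PySem.List.len (PySem.List.pyGetD net i [])) 1)
        (PySem.Set.add st.1 i, PySem.List.pySetD st.2 i true)
        hg'
        (by
          intro x hx
          rw [PySem.List.len_eq, PySem.List.mem_pyRange_one] at hx
          exact hx)
        (by simp only [hlen']; omega)
      obtain ⟨hgR, hsubR, hsoundR, hclosedR, heR⟩ := hL
      unfold pvAConcl
      rw [hstep]
      have hsub' : ∀ a ∈ st.1, a ∈ (PySem.Set.add st.1 i) := by
        intro a ha; exact (PySem.Set.mem_add _ _ _).mpr (Or.inl ha)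
      have hiin : i ∈ (PySem.Set.add st.1 i) := (PySem.Set.mem_add _ _ _).mpr (Or.inr rfl)
      refine ⟨hgR, ?_, hsubR i hiin, ?_, ?_⟩
      · intro a ha; exact hsubR a (hsub' a ha)
      · intro a ha
        rcases hsoundR a ha with h1' | h1'
        · rcases (PySem.Set.mem_add _ _ _).mp h1' with h2 | rfl
          · exact Or.inl h2
          · exact Or.inr Relation.ReflTransGen.refl
        · exact Or.inr h1'
      · intro a ha hna j hej
        by_cases hai : a = i
        · subst hai
          apply heR j
          · rw [PySem.List.len_eq, PySem.List.mem_pyRange_one]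
            exact ⟨hej.2.1, hej.2.2.1⟩
          · exact hej.2.2.2
        · have hna' : a ∉ (PySem.Set.add st.1 i) := by
            rw [PySem.Set.mem_add]
            rintro (h | h)
            · exact hna h
            · exact hai h
          exact hclosedR a ha hna' j hej

lemma pvConnectedNetwork_char (net : List (List Int))
    (hle : ∀ row ∈ net, row.length ≤ net.length) (hn : 2 ≤ net.length) :
    pvConnectedNetwork net = true ↔
      ∀ k : Int, 1 ≤ k → k < (net.length : Int) →
        Relation.ReflTransGen (pvEdge net) 1 k := by
  unfold pvConnectedNetwork
  have hg0 : pvGoodA net (PySem.Set.empty,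
      (PySem.List.pyRange 0 (PySem.List.len net) 1).map (fun a => a == 0)) := by
    refine ⟨by intro a ha; simp [PySem.Set.empty] at ha, by simp [PySem.Set.empty], ?_⟩
    show (PySem.List.pyRange 0 (PySem.List.len net) 1).map (fun a => a == 0) = _
    rw [PySem.List.len_eq]
    exact pvMask_empty net.length
  have hA := pvRecurse_spec net hle (net.length + 1) 1
    (PySem.Set.empty, (PySem.List.pyRange 0 (PySem.List.len net) 1).map (fun a => a == 0))
    hg0 (by norm_num) (by exact_mod_cast hn) (by simp [PySem.Set.empty])
  obtain ⟨hgR, _, h1in, hsound, hclosed⟩ := hA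
  set R := pvRecurse net (net.length + 1) 1
    (PySem.Set.empty, (PySem.List.pyRange 0 (PySem.List.len net) 1).map (fun a => a == 0)) with hR
  have hmem : ∀ a : Int, a ∈ R.1 ↔ Relation.ReflTransGen (pvEdge net) 1 a := by
    intro a
    constructor
    · intro ha
      rcases hsound a ha with h | h
      · simp [PySem.Set.empty] at h
      · exact h
    · intro h
      induction h with
      | refl => exact h1in
      | tail _ hbc ih =>
        exact hclosed _ ih (by simp [PySem.Set.empty]) _ hbc
  show (!(R.2.contains false)) = true ↔ _
  rw [hgR.2.2]
  rw [show (!(pvMask net.length R.1).contains false) = true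
      ↔ (pvMask net.length R.1).contains false = false by simp]
  rw [pvMask_contains_false]
  constructor
  · intro h k hk1 hk2
    rcases h k (by omega) hk2 with h0 | hmem'
    · omega
    · exact (hmem k).mp hmem'
  · intro h a ha0 han
    by_cases ha : a = 0
    · exact Or.inl ha
    · exact Or.inr ((hmem a).mpr (h a (by omega) han))

-- ----- B side -----
def pvBStep (rx ry i : Int) (row : List Int) (s : PySem.Set Int × List Int) (j : Int) :
    PySem.Set Int × List Int :=
  if !(PySem.Set.contains s.1 j) && (PySem.List.pyGetD row j 0 != 0) &&
     !((i == rx && j == ry) || (i == ry && j == rx)) then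
    (PySem.Set.add s.1 j, j :: s.2)
  else s

lemma pvBguard_iff (rx ry i j : Int) (row : List Int) (s : PySem.Set Int × List Int) :
    ((!(PySem.Set.contains s.1 j) && (PySem.List.pyGetD row j 0 != 0) &&
      !((i == rx && j == ry) || (i == ry && j == rx))) = true)
    ↔ (j ∉ s.1 ∧ PySem.List.pyGetD row j 0 ≠ 0 ∧ ¬ pvSkip rx ry i j) := by
  simp [pvSkip, not_or, and_assoc]
  tauto

def pvBC (rx ry : Int) (net : List (List Int)) (i : Int) (js : List Int)
    (s F : PySem.Set Int × List Int) : Prop :=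
  F.1.Nodup ∧
  (∀ a ∈ s.1, a ∈ F.1) ∧
  (∀ x ∈ s.2, x ∈ F.2) ∧
  (∀ x ∈ F.2, x ∈ F.1) ∧
  (∀ x ∈ F.2, x ∈ s.2 ∨ pvEdgeS rx ry net i x) ∧
  (∀ a ∈ F.1, a ∈ s.1 ∨ a ∈ F.2) ∧
  (∀ j ∈ js, pvEdgeS rx ry net i j → j ∈ F.1) ∧
  (F.2.length + s.1.length = s.2.length + F.1.length) ∧
  (∀ a ∈ F.1, a ∈ s.1 ∨ (0 ≤ a ∧ a < ((PySem.List.pyGetD net i []).length : Int)))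

lemma pvBFold_spec (rx ry : Int) (net : List (List Int)) (i : Int) (hi0 : 0 ≤ i) :
    ∀ (js : List Int) (s : PySem.Set Int × List Int),
      (∀ j ∈ js, 0 ≤ j ∧ j < ((PySem.List.pyGetD net i []).length : Int)) →
      s.1.Nodup →
      (∀ x ∈ s.2, x ∈ s.1) →
      pvBC rx ry net i js s
        (js.foldl (pvBStep rx ry i (PySem.List.pyGetD net i [])) s) := by
  intro js
  induction js with
  | nil =>
    intro s hjs hnd hss
    refine ⟨hnd, fun a ha => ha, fun x hx => hx, hss, fun x hx => Or.inl hx,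
      fun a ha => Or.inl ha, ?_, by simp, fun a ha => Or.inl ha⟩
    intro j hj
    exact absurd hj (List.not_mem_nil)
  | cons j js ihj =>
    intro s hjs hnd hss
    have hj0 : 0 ≤ j := (hjs j (by simp)).1
    have hjlt : j < ((PySem.List.pyGetD net i []).length : Int) := (hjs j (by simp)).2
    rw [List.foldl_cons]
    by_cases hc : j ∉ s.1 ∧ PySem.List.pyGetD (PySem.List.pyGetD net i []) j 0 ≠ 0 ∧
        ¬ pvSkip rx ry i j
    · -- pushed
      have hstep : pvBStep rx ry i (PySem.List.pyGetD net i []) s j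
          = (PySem.Set.add s.1 j, j :: s.2) := by
        rw [pvBStep, if_pos ((pvBguard_iff rx ry i j _ s).mpr hc)]
      rw [hstep]
      have hnd' : (PySem.Set.add s.1 j).Nodup := PySem.Set.nodup_add _ _ hnd
      have hss' : ∀ x ∈ j :: s.2, x ∈ PySem.Set.add s.1 j := by
        intro x hx
        rcases List.mem_cons.mp hx with rfl | hx'
        · exact (PySem.Set.mem_add _ _ _).mpr (Or.inr rfl)
        · exact (PySem.Set.mem_add _ _ _).mpr (Or.inl (hss x hx'))
      have hIH := ihj (PySem.Set.add s.1 j, j :: s.2)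
        (fun z hz => hjs z (by simp [hz])) hnd' hss'
      obtain ⟨c1, c2, c3, c4, c5, c6, c7, c8, c9⟩ := hIH
      have hedge : pvEdgeS rx ry net i j := ⟨⟨hi0, hj0, hjlt, hc.2.1⟩, hc.2.2⟩
      have hsub1 : ∀ a ∈ s.1, a ∈ PySem.Set.add s.1 j :=
        fun a ha => (PySem.Set.mem_add _ _ _).mpr (Or.inl ha)
      have hlenadd : (PySem.Set.add s.1 j).length = s.1.length + 1 := by
        simp [PySem.Set.add_of_not_mem hc.1]
      refine ⟨c1, fun a ha => c2 a (hsub1 a ha), fun x hx => c3 x (by simp [hx]),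
        c4, ?_, ?_, ?_, by simp at c8 ⊢; omega, ?_⟩
      · intro x hx
        rcases c5 x hx with h | h
        · rcases List.mem_cons.mp h with rfl | h'
          · exact Or.inr hedge
          · exact Or.inl h'
        · exact Or.inr h
      · intro a ha
        rcases c6 a ha with h | h
        · rcases (PySem.Set.mem_add _ _ _).mp h with h' | rfl
          · exact Or.inl h'
          · exact Or.inr (c3 _ (by simp))
        · exact Or.inr h
      · intro z hz hez
        rcases List.mem_cons.mp hz with rfl | hz'
        · exact c2 _ ((PySem.Set.mem_add _ _ _).mpr (Or.inr rfl))
        · exact c7 z hz' hez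
      · intro a ha
        rcases c9 a ha with h | h
        · rcases (PySem.Set.mem_add _ _ _).mp h with h' | rfl
          · exact Or.inl h'
          · exact Or.inr ⟨hj0, hjlt⟩
        · exact Or.inr h
    · -- not pushed
      have hstep : pvBStep rx ry i (PySem.List.pyGetD net i []) s j = s := by
        rw [pvBStep, if_neg]
        rw [pvBguard_iff]
        exact hc
      rw [hstep]
      have hIH := ihj s (fun z hz => hjs z (by simp [hz])) hnd hss
      obtain ⟨c1, c2, c3, c4, c5, c6, c7, c8, c9⟩ := hIH
      refine ⟨c1, c2, c3, c4, c5, c6, ?_, c8, c9⟩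
      intro z hz hez
      rcases List.mem_cons.mp hz with rfl | hz'
      · -- guard failed but edge holds: z must already be in s.1
        by_cases hzin : z ∈ s.1
        · exact c2 z hzin
        · exact absurd ⟨hzin, hez.1.2.2.2, hez.2⟩ hc
      · exact c7 z hz' hez

def pvGoodB (net : List (List Int)) (reach : PySem.Set Int) : Prop :=
  (∀ a ∈ reach, 0 ≤ a ∧ a < (net.length : Int)) ∧ reach.Nodup

lemma pvReachLoop_spec (rx ry : Int) (net : List (List Int))
    (hle : ∀ row ∈ net, row.length ≤ net.length) :
    ∀ (f : Nat) (reach : PySem.Set Int) (stack : List Int),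
      pvGoodB net reach → (∀ x ∈ stack, x ∈ reach) →
      (∀ a ∈ reach, a ∉ stack → ∀ j, pvEdgeS rx ry net a j → j ∈ reach) →
      stack.length + net.length + 1 ≤ f + reach.length →
      pvGoodB net (pvReachLoop rx ry net f reach stack) ∧
      (∀ a ∈ reach, a ∈ pvReachLoop rx ry net f reach stack) ∧
      (∀ a ∈ pvReachLoop rx ry net f reach stack,
        a ∈ reach ∨ ∃ x ∈ stack, Relation.ReflTransGen (pvEdgeS rx ry net) x a) ∧
      (∀ a ∈ pvReachLoop rx ry net f reach stack, ∀ j, pvEdgeS rx ry net a j →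
        j ∈ pvReachLoop rx ry net f reach stack) := by
  intro f
  induction f with
  | zero =>
    intro reach stack hg hss hcl hfuel
    exact absurd hfuel (by have := pvCard_le hg.2 hg.1; omega)
  | succ f IHf =>
    intro reach stack hg hss hcl hfuel
    match stack with
    | [] =>
      have hstep : pvReachLoop rx ry net (f + 1) reach [] = reach := by
        rw [pvReachLoop]
        omega
      rw [hstep]
      exact ⟨hg, fun a ha => ha, fun a ha => Or.inl ha,
        fun a ha j hej => hcl a ha (List.not_mem_nil) j hej⟩
    | i :: rest =>
      have hi : i ∈ reach := hss i (by simp)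
      have hi0 : 0 ≤ i := (hg.1 i hi).1
      have hin : i < (net.length : Int) := (hg.1 i hi).2
      have hrow : (PySem.List.pyGetD net i []).length ≤ net.length := pvRow_le hle hi0
      have hstep : pvReachLoop rx ry net (f + 1) reach (i :: rest)
          = pvReachLoop rx ry net f
              ((PySem.List.pyRange 0 (PySem.List.len (PySem.List.pyGetD net i [])) 1).foldl
                (pvBStep rx ry i (PySem.List.pyGetD net i [])) (reach, rest)).1
              ((PySem.List.pyRange 0 (PySem.List.len (PySem.List.pyGetD net i [])) 1).foldl
                (pvBStep rx ry i (PySem.List.pyGetD net i [])) (reach, rest)).2 := by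
        rw [pvReachLoop]
        rfl
      set F0 := (PySem.List.pyRange 0 (PySem.List.len (PySem.List.pyGetD net i [])) 1).foldl
        (pvBStep rx ry i (PySem.List.pyGetD net i [])) (reach, rest) with hF0
      have hB := pvBFold_spec rx ry net i hi0
        (PySem.List.pyRange 0 (PySem.List.len (PySem.List.pyGetD net i [])) 1)
        (reach, rest)
        (by intro z hz; rw [PySem.List.len_eq, PySem.List.mem_pyRange_one] at hz; exact hz)
        hg.2 (fun x hx => hss x (by simp [hx]))
      obtain ⟨c1, c2, c3, c4, c5, c6, c7, c8, c9⟩ := hB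
      have hg' : pvGoodB net F0.1 := by
        refine ⟨?_, c1⟩
        intro a ha
        rcases c9 a ha with h | h
        · exact hg.1 a h
        · exact ⟨h.1, by omega⟩
      have hss' : ∀ x ∈ F0.2, x ∈ F0.1 := c4
      have hcl' : ∀ a ∈ F0.1, a ∉ F0.2 → ∀ j, pvEdgeS rx ry net a j → j ∈ F0.1 := by
        intro a ha hna j hej
        by_cases hai : a = i
        · subst hai
          apply c7 j _ hej
          rw [PySem.List.len_eq, PySem.List.mem_pyRange_one]
          exact ⟨hej.1.2.1, hej.1.2.2.1⟩
        · rcases c6 a ha with h | h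
          · have hnr : a ∉ rest := fun hr => hna (c3 a hr)
            have : a ∉ i :: rest := by simp [hai, hnr]
            exact c2 j (hcl a h this j hej)
          · exact absurd h hna
      have hfuel' : F0.2.length + net.length + 1 ≤ f + F0.1.length := by
        have c8' : F0.2.length + reach.length = rest.length + F0.1.length := by simpa using c8
        simp only [List.length_cons] at hfuel
        omega
      have hrec := IHf F0.1 F0.2 hg' hss' hcl' hfuel'
      obtain ⟨r1, r2, r3, r4⟩ := hrec
      rw [hstep]
      refine ⟨r1, fun a ha => r2 a (c2 a ha), ?_, r4⟩
      intro a ha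
      rcases r3 a ha with h | ⟨x, hx, hrx⟩
      · rcases c6 a h with h' | h'
        · exact Or.inl h'
        · rcases c5 a h' with h'' | h''
          · exact Or.inr ⟨a, by simp [h''], Relation.ReflTransGen.refl⟩
          · exact Or.inr ⟨i, by simp, Relation.ReflTransGen.single h''⟩
      · rcases c5 x hx with h' | h'
        · exact Or.inr ⟨x, by simp [h'], hrx⟩
        · exact Or.inr ⟨i, by simp, Relation.ReflTransGen.head h' hrx⟩

lemma pvConnectedWithout_char (rx ry : Int) (net : List (List Int))
    (hle : ∀ row ∈ net, row.length ≤ net.length) (hn : 2 ≤ net.length) :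
    pvConnectedWithout rx ry net = true ↔
      ∀ k : Int, 1 ≤ k → k < (net.length : Int) →
        Relation.ReflTransGen (pvEdgeS rx ry net) 1 k := by
  unfold pvConnectedWithout
  have hinit : PySem.Set.add PySem.Set.empty (1 : Int) = [1] := rfl
  have hg0 : pvGoodB net (PySem.Set.add PySem.Set.empty (1 : Int)) := by
    rw [hinit]
    refine ⟨?_, by simp⟩
    intro a ha
    simp at ha
    subst ha
    constructor <;> [norm_num; exact_mod_cast hn]
  have hB := pvReachLoop_spec rx ry net hle (net.length + 1)
    (PySem.Set.add PySem.Set.empty (1 : Int)) [1]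
    hg0 (by rw [hinit]; intro x hx; simpa using hx)
    (by
      rw [hinit]
      intro a ha hna
      simp at ha
      simp [ha] at hna)
    (by rw [hinit]; simp; omega)
  obtain ⟨hgF, hsubF, hsoundF, hclF⟩ := hB
  set F := pvReachLoop rx ry net (net.length + 1) (PySem.Set.add PySem.Set.empty (1 : Int)) [1]
    with hF
  have hmem : ∀ a : Int, a ∈ F ↔ Relation.ReflTransGen (pvEdgeS rx ry net) 1 a := by
    intro a
    constructor
    · intro ha
      rcases hsoundF a ha with h | ⟨x, hx, hrx⟩
      · rw [hinit] at h
        simp at h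
        subst h
        exact Relation.ReflTransGen.refl
      · simp at hx
        subst hx
        exact hrx
    · intro h
      induction h with
      | refl => exact hsubF 1 (by rw [hinit]; simp)
      | tail _ hbc ih => exact hclF _ ih _ hbc
  show ((PySem.List.pyRange 1 (PySem.List.len net) 1).all fun k => PySem.Set.contains F k) = true ↔ _
  rw [List.all_eq_true]
  constructor
  · intro h k hk1 hk2
    have := h k (by rw [PySem.List.len_eq, PySem.List.mem_pyRange_one]; exact ⟨hk1, hk2⟩)
    exact (hmem k).mp ((PySem.Set.contains_iff _ _).mp this)
  · intro h k hk
    rw [PySem.List.len_eq, PySem.List.mem_pyRange_one] at hk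
    exact (PySem.Set.contains_iff _ _).mpr ((hmem k).mpr (h k hk.1 hk.2))

-- ----- removing the edge {x,y} versus skipping it -----
lemma pvRemove_len (net : List (List Int)) (x y : Int) :
    (pvRemoveConnection x y net).length = net.length := by
  unfold pvRemoveConnection
  simp [PySem.List.length_pySetD]

lemma pvRemove_row (net : List (List Int))
    {x y : Int} (h0 : 0 ≤ x) (hxy : x < y) (hyn : y < (net.length : Int)) :
    ∀ i : Int, 0 ≤ i →
      PySem.List.pyGetD (pvRemoveConnection x y net) i []
      = if i = y then PySem.List.pySetD (PySem.List.pyGetD net y []) x 0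
        else if i = x then PySem.List.pySetD (PySem.List.pyGetD net x []) y 0
        else PySem.List.pyGetD net i [] := by
  intro i hi
  have hxn : x < (net.length : Int) := by omega
  have hxnat : x.toNat < net.length := by omega
  have hynat : y.toNat < net.length := by omega
  unfold pvRemoveConnection
  rw [PySem.List.pySetD_of_nonneg _ _ h0]
  have hget1 : ∀ (k : Int), 0 ≤ k →
      PySem.List.pyGetD (net.set x.toNat (PySem.List.pySetD (PySem.List.pyGetD net x []) y 0)) k []
      = if k = (x.toNat : Int) then PySem.List.pySetD (PySem.List.pyGetD net x []) y 0
        else PySem.List.pyGetD net k [] := by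
    intro k hk
    exact pvGetD_set net x.toNat _ [] k hk hxnat
  rw [PySem.List.pySetD_of_nonneg _ _ (by omega : (0:Int) ≤ y)]
  have hset1len : (net.set x.toNat (PySem.List.pySetD (PySem.List.pyGetD net x []) y 0)).length
      = net.length := by simp
  have hget2 := pvGetD_set
    (net.set x.toNat (PySem.List.pySetD (PySem.List.pyGetD net x []) y 0)) y.toNat
    (PySem.List.pySetD (PySem.List.pyGetD (net.set x.toNat
      (PySem.List.pySetD (PySem.List.pyGetD net x []) y 0)) y []) x 0) [] i hi
    (by rw [hset1len]; exact hynat)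
  rw [hget2]
  have hyx : ¬ (y = (x.toNat : Int)) := by omega
  have hrow_y : PySem.List.pyGetD (net.set x.toNat
      (PySem.List.pySetD (PySem.List.pyGetD net x []) y 0)) y [] = PySem.List.pyGetD net y [] := by
    rw [hget1 y (by omega), if_neg hyx]
  by_cases hiy : i = y
  · rw [if_pos (show i = (y.toNat : Int) by omega)]
    rw [if_pos hiy, hrow_y]
  · rw [if_neg (by omega : ¬ i = (y.toNat : Int)), if_neg hiy]
    rw [hget1 i hi]
    by_cases hix : i = x
    · rw [if_pos (by omega : i = (x.toNat : Int)), if_pos hix]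
    · rw [if_neg (by omega : ¬ i = (x.toNat : Int)), if_neg hix]

lemma pvRemove_edge (net : List (List Int))
    {x y : Int} (h0 : 0 ≤ x) (hxy : x < y) (hyn : y < (net.length : Int))
    (hyr : y < ((PySem.List.pyGetD net x []).length : Int))
    (hxr : x < ((PySem.List.pyGetD net y []).length : Int)) :
    ∀ i j : Int, pvEdge (pvRemoveConnection x y net) i j ↔ pvEdgeS x y net i j := by
  intro i j
  have hxn : x < (net.length : Int) := by omega
  constructor
  · rintro ⟨hi0, hj0, hjlen, hne⟩
    rw [pvRemove_row net h0 hxy hyn i hi0] at hjlen hne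
    by_cases hiy : i = y
    · rw [if_pos hiy] at hjlen hne
      rw [PySem.List.pySetD_of_nonneg _ _ h0] at hjlen hne
      have hxnat2 : x.toNat < (PySem.List.pyGetD net y []).length := by omega
      rw [pvGetD_set _ x.toNat _ _ j hj0 hxnat2] at hne
      by_cases hjx : j = (x.toNat : Int)
      · rw [if_pos hjx] at hne
        exact absurd rfl hne
      · rw [if_neg hjx] at hne
        refine ⟨⟨hi0, hj0, by rw [hiy]; simpa using hjlen, by rw [hiy]; exact hne⟩, ?_⟩
        rw [pvSkip]
        rintro (⟨hyx', _⟩ | ⟨_, hjx'⟩)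
        · omega
        · exact hjx (by omega)
    · rw [if_neg hiy] at hjlen hne
      by_cases hix : i = x
      · rw [if_pos hix] at hjlen hne
        rw [PySem.List.pySetD_of_nonneg _ _ (by omega : (0:Int) ≤ y)] at hjlen hne
        have hynat2 : y.toNat < (PySem.List.pyGetD net x []).length := by omega
        rw [pvGetD_set _ y.toNat _ _ j hj0 hynat2] at hne
        by_cases hjy : j = (y.toNat : Int)
        · rw [if_pos hjy] at hne
          exact absurd rfl hne
        · rw [if_neg hjy] at hne
          refine ⟨⟨hi0, hj0, by rw [hix]; simpa using hjlen, by rw [hix]; exact hne⟩, ?_⟩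
          rw [pvSkip]
          rintro (⟨_, hjy'⟩ | ⟨hxy', _⟩)
          · exact hjy (by omega)
          · omega
      · rw [if_neg hix] at hjlen hne
        refine ⟨⟨hi0, hj0, hjlen, hne⟩, ?_⟩
        rw [pvSkip]
        rintro (⟨hix', _⟩ | ⟨hiy', _⟩)
        · exact hix hix'
        · exact hiy hiy'
  · rintro ⟨⟨hi0, hj0, hjlen, hne⟩, hskip⟩
    rw [pvSkip, not_or] at hskip
    refine ⟨hi0, hj0, ?_, ?_⟩
    · rw [pvRemove_row net h0 hxy hyn i hi0]
      by_cases hiy : i = y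
      · rw [hiy] at hjlen
        rw [if_pos hiy, PySem.List.pySetD_of_nonneg _ _ h0]
        simpa using hjlen
      · rw [if_neg hiy]
        by_cases hix : i = x
        · rw [hix] at hjlen
          rw [if_pos hix, PySem.List.pySetD_of_nonneg _ _ (by omega : (0:Int) ≤ y)]
          simpa using hjlen
        · rw [if_neg hix]; exact hjlen
    · rw [pvRemove_row net h0 hxy hyn i hi0]
      by_cases hiy : i = y
      · rw [hiy] at hne
        rw [if_pos hiy, PySem.List.pySetD_of_nonneg _ _ h0]
        have hxnat2 : x.toNat < (PySem.List.pyGetD net y []).length := by omega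
        rw [pvGetD_set _ x.toNat _ _ j hj0 hxnat2]
        have hjx : ¬ j = (x.toNat : Int) := by
          intro h
          exact hskip.2 ⟨hiy, by omega⟩
        rw [if_neg hjx]
        exact hne
      · rw [if_neg hiy]
        by_cases hix : i = x
        · rw [hix] at hne
          rw [if_pos hix, PySem.List.pySetD_of_nonneg _ _ (by omega : (0:Int) ≤ y)]
          have hynat2 : y.toNat < (PySem.List.pyGetD net x []).length := by omega
          rw [pvGetD_set _ y.toNat _ _ j hj0 hynat2]
          have hjy : ¬ j = (y.toNat : Int) := by
            intro h
            exact hskip.1 ⟨hix, by omega⟩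
          rw [if_neg hjy]
          exact hne
        · rw [if_neg hix]
          exact hne

lemma pvRemove_le (net : List (List Int)) (hle : ∀ row ∈ net, row.length ≤ net.length)
    {x y : Int} (h0 : 0 ≤ x) (hxy : x < y) (hyn : y < (net.length : Int)) :
    ∀ row ∈ pvRemoveConnection x y net, row.length ≤ (pvRemoveConnection x y net).length := by
  intro row hrow
  rw [pvRemove_len]
  have hxn : x < (net.length : Int) := by omega
  have hrowx : (PySem.List.pyGetD net x []).length ≤ net.length := pvRow_le hle h0
  have hrowy : (PySem.List.pyGetD net y []).length ≤ net.length := pvRow_le hle (by omega : (0:Int) ≤ y)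
  unfold pvRemoveConnection at hrow
  rw [PySem.List.pySetD_of_nonneg _ _ (by omega : (0:Int) ≤ y)] at hrow
  rcases List.mem_or_eq_of_mem_set hrow with hrow1 | rfl
  · rw [PySem.List.pySetD_of_nonneg _ _ h0] at hrow1
    rcases List.mem_or_eq_of_mem_set hrow1 with hrow2 | rfl
    · exact hle row hrow2
    · rw [PySem.List.pySetD_of_nonneg _ _ (by omega : (0:Int) ≤ y)]
      simpa using hrowx
  · rw [PySem.List.pySetD_of_nonneg _ _ h0]
    have : PySem.List.pyGetD (PySem.List.pySetD net x
        (PySem.List.pySetD (PySem.List.pyGetD net x []) y 0)) y [] = PySem.List.pyGetD net y [] := by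
      rw [PySem.List.pySetD_of_nonneg _ _ h0]
      rw [pvGetD_set net x.toNat _ [] y (by omega) (by omega)]
      rw [if_neg (by omega : ¬ y = (x.toNat : Int))]
    rw [this]
    simpa using hrowy

lemma pvRemovable_eq (net : List (List Int)) (hle : ∀ row ∈ net, row.length ≤ net.length)
    {x y : Int} (h0 : 0 ≤ x) (hxy : x < y) (hyn : y < (net.length : Int))
    (hyr : y < ((PySem.List.pyGetD net x []).length : Int))
    (hxr : x < ((PySem.List.pyGetD net y []).length : Int)) :
    pvIsRemovable x y net = pvConnectedWithout x y net := by
  have hn2 : 2 ≤ net.length := by omega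
  have hn2' : 2 ≤ (pvRemoveConnection x y net).length := by rw [pvRemove_len]; exact hn2
  apply Bool.coe_iff_coe.mp
  unfold pvIsRemovable
  rw [pvConnectedNetwork_char _ (pvRemove_le net hle h0 hxy hyn) hn2',
    pvConnectedWithout_char x y net hle hn2, pvRemove_len]
  constructor
  · intro h k hk1 hk2
    exact Relation.ReflTransGen.mono
      (fun c d hcd => (pvRemove_edge net h0 hxy hyn hyr hxr c d).mp hcd) (h k hk1 hk2)
  · intro h k hk1 hk2
    exact Relation.ReflTransGen.mono
      (fun c d hcd => (pvRemove_edge net h0 hxy hyn hyr hxr c d).mpr hcd) (h k hk1 hk2)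

-- ----- outer loops: last hit scanning forward = first hit scanning backward -----
def pvCondA (net : List (List Int)) (x y : Int) : Bool :=
  decide (PySem.List.pyGetD (PySem.List.pyGetD net x []) y 0 > 0) && pvIsRemovable x y net

def pvRowA (net : List (List Int)) (x : Int) : Option (Int × Int) :=
  ((PySem.List.pyRange (x + 1) (PySem.List.len (PySem.List.pyGetD net x [])) 1).reverse.find?
    (pvCondA net x)).map (fun y => (x, y))

lemma pvInnerA (net : List (List Int)) (x : Int) :
    ∀ (ys : List Int) (acc : Int × Option (Int × Int)), acc.1 = 0 →
      ys.foldl (fun acc y =>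
        if PySem.List.pyGetD (PySem.List.pyGetD net x []) y 0 > acc.1 then
          (if pvIsRemovable x y net then (acc.1, some (x, y)) else acc)
        else acc) acc
      = (0, ((ys.reverse.find? (pvCondA net x)).map (fun y => (x, y))).or acc.2) := by
  intro ys
  induction ys with
  | nil =>
    rintro ⟨a1, a2⟩ h
    simp at h
    subst h
    simp
  | cons y ys ih =>
    rintro ⟨a1, a2⟩ h
    simp at h
    subst h
    rw [List.foldl_cons]
    have hstep : (if PySem.List.pyGetD (PySem.List.pyGetD net x []) y 0 > (0, a2).1 then
          (if pvIsRemovable x y net then ((0, a2).1, some (x, y)) else ((0:Int), a2))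
        else ((0:Int), a2))
        = ((0 : Int), if pvCondA net x y = true then some (x, y) else a2) := by
      unfold pvCondA
      by_cases h1 : PySem.List.pyGetD (PySem.List.pyGetD net x []) y 0 > 0
      · by_cases h2 : pvIsRemovable x y net = true <;> simp [h1, h2]
      · simp [h1]
    rw [hstep, ih _ rfl]
    rw [List.reverse_cons, List.find?_append]
    cases hfind : ys.reverse.find? (pvCondA net x) with
    | some w => simp
    | none =>
      by_cases hc : pvCondA net x y = true
      · simp [List.find?, hc]
      · simp [List.find?, Bool.eq_false_iff.mpr hc]

lemma pvOuterA (net : List (List Int)) :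
    ∀ (xs : List Int) (acc : Int × Option (Int × Int)), acc.1 = 0 →
      xs.foldl (fun acc x =>
        (PySem.List.pyRange (x + 1) (PySem.List.len (PySem.List.pyGetD net x [])) 1).foldl
          (fun acc y =>
            if PySem.List.pyGetD (PySem.List.pyGetD net x []) y 0 > acc.1 then
              (if pvIsRemovable x y net then (acc.1, some (x, y)) else acc)
            else acc) acc) acc
      = (0, (xs.reverse.findSome? (pvRowA net)).or acc.2) := by
  intro xs
  induction xs with
  | nil =>
    rintro ⟨a1, a2⟩ h
    simp at h
    subst h
    simp
  | cons x xs ih =>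
    rintro ⟨a1, a2⟩ h
    simp at h
    subst h
    rw [List.foldl_cons]
    rw [pvInnerA net x _ _ rfl]
    rw [ih _ rfl]
    rw [List.reverse_cons, List.findSome?_append]
    show _ = (0, _)
    congr 1
    cases hfind : xs.reverse.findSome? (pvRowA net) with
    | some w => simp
    | none =>
      simp only [Option.none_or]
      have hsingle : List.findSome? (pvRowA net) [x] = pvRowA net x := by
        cases hrow : pvRowA net x <;> simp [List.findSome?_cons, hrow]
      rw [hsingle]
      rfl

def pvRowB (net : List (List Int)) (x : Int) : Option (Int × Int) :=
  ((PySem.List.pyRange (PySem.List.len (PySem.List.pyGetD net x []) - 1) x (-1)).find?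
    (fun y => decide (PySem.List.pyGetD (PySem.List.pyGetD net x []) y 0 > 0) &&
      pvConnectedWithout x y net)).map (fun y => (x, y))

lemma pvFindRow_eq (net : List (List Int)) :
    ∀ L : List Int, pvFindRow net L = L.findSome? (pvRowB net) := by
  intro L
  induction L with
  | nil => rw [pvFindRow]; simp
  | cons x xs ih =>
    rw [pvFindRow]
    cases hfind : (PySem.List.pyRange (PySem.List.len (PySem.List.pyGetD net x []) - 1) x
        (-1)).find? (fun y => decide (PySem.List.pyGetD (PySem.List.pyGetD net x []) y 0 > 0) &&
          pvConnectedWithout x y net) with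
    | some y =>
      have : pvRowB net x = some (x, y) := by rw [pvRowB, hfind]; rfl
      simp [List.findSome?_cons, this]
    | none =>
      have : pvRowB net x = none := by rw [pvRowB, hfind]; rfl
      simp only [List.findSome?_cons, this]
      exact ih

lemma pvFind?_congr {α : Type} {p q : α → Bool} :
    ∀ L : List α, (∀ x ∈ L, p x = q x) → L.find? p = L.find? q := by
  intro L
  induction L with
  | nil => intro _; rfl
  | cons a L ih =>
    intro h
    have ha := h a (by simp)
    cases hq : q a with
    | true => rw [List.find?_cons_of_pos (ha.trans hq), List.find?_cons_of_pos hq]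
    | false =>
      rw [List.find?_cons_of_neg (by rw [ha, hq]; simp), List.find?_cons_of_neg (by rw [hq]; simp)]
      exact ih (fun x hx => h x (by simp [hx]))

lemma pvFindSome?_congr {α β : Type} {f g : α → Option β} :
    ∀ L : List α, (∀ x ∈ L, f x = g x) → L.findSome? f = L.findSome? g := by
  intro L
  induction L with
  | nil => intro _; rfl
  | cons a L ih =>
    intro h
    rw [List.findSome?_cons, List.findSome?_cons, h a (by simp)]
    cases g a with
    | some b => rfl
    | none => exact ih (fun x hx => h x (by simp [hx]))

lemma pvRow_eq (net : List (List Int)) (hle : ∀ row ∈ net, row.length ≤ net.length)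
    (hsafe : ∀ x ∈ PySem.List.pyRange 0 (PySem.List.len net) 1,
      ∀ y ∈ PySem.List.pyRange (x + 1) (PySem.List.len (PySem.List.pyGetD net x [])) 1,
        0 < PySem.List.pyGetD (PySem.List.pyGetD net x []) y 0 →
          x < ((PySem.List.pyGetD net y []).length : Int))
    {x : Int} (hx0 : 0 ≤ x) (hxn : x < (net.length : Int)) :
    pvRowA net x = pvRowB net x := by
  unfold pvRowA pvRowB
  have hrev : PySem.List.pyRange (PySem.List.len (PySem.List.pyGetD net x []) - 1) x (-1)
      = (PySem.List.pyRange (x + 1) (PySem.List.len (PySem.List.pyGetD net x [])) 1).reverse := by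
    have h1 : PySem.List.len (PySem.List.pyGetD net x []) - 1 + 1
        = PySem.List.len (PySem.List.pyGetD net x []) := by ring
    rw [PySem.List.pyRange_neg_one_eq_reverse, h1]
  rw [hrev]
  congr 1
  apply pvFind?_congr
  intro y hy
  rw [List.mem_reverse, PySem.List.mem_pyRange_one, PySem.List.len_eq] at hy
  by_cases hpos : 0 < PySem.List.pyGetD (PySem.List.pyGetD net x []) y 0
  · have hyr : y < ((PySem.List.pyGetD net x []).length : Int) := hy.2
    have hrle : (PySem.List.pyGetD net x []).length ≤ net.length := pvRow_le hle hx0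
    have hyn : y < (net.length : Int) := by omega
    have hxr : x < ((PySem.List.pyGetD net y []).length : Int) := by
      apply hsafe x ?_ y ?_ hpos
      · rw [PySem.List.mem_pyRange_one]
        exact ⟨hx0, by rw [PySem.List.len_eq]; exact hxn⟩
      · rw [PySem.List.mem_pyRange_one]
        exact ⟨by omega, by rw [PySem.List.len_eq]; exact hy.2⟩
    unfold pvCondA
    rw [pvRemovable_eq net hle hx0 (by omega) hyn hyr hxr]
  · unfold pvCondA
    have hd : decide (PySem.List.pyGetD (PySem.List.pyGetD net x []) y 0 > 0) = false := by
      simp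
      omega
    rw [hd]
    simp

lemma pvMain_eq (net : List (List Int)) (hle : ∀ row ∈ net, row.length ≤ net.length)
    (hsafe : ∀ x ∈ PySem.List.pyRange 0 (PySem.List.len net) 1,
      ∀ y ∈ PySem.List.pyRange (x + 1) (PySem.List.len (PySem.List.pyGetD net x [])) 1,
        0 < PySem.List.pyGetD (PySem.List.pyGetD net x []) y 0 →
          x < ((PySem.List.pyGetD net y []).length : Int)) :
    maxRedunConnect net = maxRedunConnect_alt net := by
  show ((PySem.List.pyRange 0 (PySem.List.len net) 1).foldl
    (fun (acc : Int × Option (Int × Int)) x =>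
      (PySem.List.pyRange (x + 1) (PySem.List.len (PySem.List.pyGetD net x [])) 1).foldl
        (fun (acc : Int × Option (Int × Int)) y =>
          if PySem.List.pyGetD (PySem.List.pyGetD net x []) y 0 > acc.1 then
            (if pvIsRemovable x y net then (acc.1, some (x, y)) else acc)
          else acc) acc) ((0 : Int), (none : Option (Int × Int)))).2 = _
  rw [pvOuterA net _ _ rfl]
  show ((PySem.List.pyRange 0 (PySem.List.len net) 1).reverse.findSome? (pvRowA net)).or none
    = maxRedunConnect_alt net
  rw [Option.or_none]
  unfold maxRedunConnect_alt
  rw [pvFindRow_eq]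
  have hrev : PySem.List.pyRange (PySem.List.len net - 1) (-1) (-1)
      = (PySem.List.pyRange 0 (PySem.List.len net) 1).reverse := by
    have h2 : ((-1 : Int) + 1) = 0 := by norm_num
    have h3 : PySem.List.len net - 1 + 1 = PySem.List.len net := by ring
    rw [PySem.List.pyRange_neg_one_eq_reverse, h2, h3]
  rw [hrev]
  apply pvFindSome?_congr
  intro x hx
  rw [List.mem_reverse, PySem.List.mem_pyRange_one, PySem.List.len_eq] at hx
  exact pvRow_eq net hle hsafe hx.1 hx.2

lemma pvMain_none (net : List (List Int))
    (hno : ∀ x ∈ PySem.List.pyRange 0 (PySem.List.len net) 1,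
      ∀ y ∈ PySem.List.pyRange (x + 1) (PySem.List.len (PySem.List.pyGetD net x [])) 1,
        PySem.List.pyGetD (PySem.List.pyGetD net x []) y 0 ≤ 0) :
    maxRedunConnect net = maxRedunConnect_alt net := by
  have hrowA : ∀ x ∈ (PySem.List.pyRange 0 (PySem.List.len net) 1).reverse,
      pvRowA net x = none := by
    intro x hx
    rw [List.mem_reverse] at hx
    unfold pvRowA
    rw [List.find?_eq_none.mpr ?_]
    · rfl
    · intro y hy
      rw [List.mem_reverse] at hy
      have h := hno x hx y hy
      unfold pvCondA
      simp
      omega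
  have hrowB : ∀ x ∈ (PySem.List.pyRange 0 (PySem.List.len net) 1).reverse,
      pvRowB net x = none := by
    intro x hx
    rw [List.mem_reverse] at hx
    unfold pvRowB
    rw [List.find?_eq_none.mpr ?_]
    · rfl
    · intro y hy
      have h1 : PySem.List.len (PySem.List.pyGetD net x []) - 1 + 1
          = PySem.List.len (PySem.List.pyGetD net x []) := by ring
      rw [PySem.List.pyRange_neg_one_eq_reverse, h1, List.mem_reverse] at hy
      have h := hno x hx y hy
      simp
      omega
  show ((PySem.List.pyRange 0 (PySem.List.len net) 1).foldl
    (fun (acc : Int × Option (Int × Int)) x =>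
      (PySem.List.pyRange (x + 1) (PySem.List.len (PySem.List.pyGetD net x [])) 1).foldl
        (fun (acc : Int × Option (Int × Int)) y =>
          if PySem.List.pyGetD (PySem.List.pyGetD net x []) y 0 > acc.1 then
            (if pvIsRemovable x y net then (acc.1, some (x, y)) else acc)
          else acc) acc) ((0 : Int), (none : Option (Int × Int)))).2 = _
  rw [pvOuterA net _ _ rfl]
  show ((PySem.List.pyRange 0 (PySem.List.len net) 1).reverse.findSome? (pvRowA net)).or none
    = maxRedunConnect_alt net
  rw [Option.or_none, List.findSome?_eq_none_iff.mpr hrowA]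
  unfold maxRedunConnect_alt
  rw [pvFindRow_eq]
  have hrev : PySem.List.pyRange (PySem.List.len net - 1) (-1) (-1)
      = (PySem.List.pyRange 0 (PySem.List.len net) 1).reverse := by
    have h2 : ((-1 : Int) + 1) = 0 := by norm_num
    have h3 : PySem.List.len net - 1 + 1 = PySem.List.len net := by ring
    rw [PySem.List.pyRange_neg_one_eq_reverse, h2, h3]
  rw [hrev, List.findSome?_eq_none_iff.mpr hrowB]

-- ===== VERDICT (by name: the statement is the Claim_ definition above) =====
theorem maxRedunConnect_spec : Claim_equal_maxRedunConnect := by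
  intro network _ hpre
  unfold Spec_maxRedunConnect
  rcases hpre with hno | ⟨hle, hsafe⟩
  · exact pvMain_none network hno
  · exact pvMain_eq network hle hsafe
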